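-- pv_equiv track=rewrite | github.com/MarleneRuth/Proyecto_EDTI | game.py | comprimir
-- ===== SOURCE A (Python) =====
-- def comprimir(fila):
--     nueva_fila = [n for n in fila if n != 0]
--     for i in range(len(nueva_fila) - 1):
--         if nueva_fila[i] == nueva_fila[i+1]:
--             nueva_fila[i] *= 2
--             nueva_fila[i+1] = 0
--     nueva_fila = [n for n in nueva_fila if n != 0]
--     return nueva_fila + [0] * (4 - len(nueva_fila))
-- ===== SOURCE B (Python) =====
-- def comprimir(fila):
--     vals = [n for n in fila if n != 0]
--     result = []
--     i = 0
--     while i < len(vals):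
--         if i + 1 < len(vals) and vals[i] == vals[i + 1]:
--             result.append(vals[i] * 2)
--             i += 2
--         else:
--             result.append(vals[i])
--             i += 1
--     return result + [0] * (4 - len(result))
-- ===== Notes on version B (the rewrite author's own statement) =====
-- stated objective: simpler
-- what changed: Single forward scan that emits merged/unmerged tiles directly into a fresh result list, replacing A's three passes (filter, in-place double-and-zero loop, re-filter).
import Mathlib
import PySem

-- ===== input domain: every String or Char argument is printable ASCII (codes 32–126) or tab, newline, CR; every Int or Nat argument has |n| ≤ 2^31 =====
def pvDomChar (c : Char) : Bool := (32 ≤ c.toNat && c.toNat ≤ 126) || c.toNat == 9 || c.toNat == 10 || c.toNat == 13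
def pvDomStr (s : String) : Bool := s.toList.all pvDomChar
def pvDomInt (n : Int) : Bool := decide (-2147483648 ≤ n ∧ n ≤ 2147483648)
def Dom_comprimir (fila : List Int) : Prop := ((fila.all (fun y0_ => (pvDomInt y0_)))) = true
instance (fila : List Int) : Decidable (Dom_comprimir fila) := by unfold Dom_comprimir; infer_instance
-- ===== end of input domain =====

-- B: single forward scan emitting merged/unmerged tiles into a fresh list, instead of A's
-- filter / in-place double-and-zero loop / re-filter three passes (objective: simpler).


-- ===== PORT A =====
-- the in-place 'for i in range(len(nueva_fila)-1)' loop; indices are always in range,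
-- so getD is exact; List.set preserves length, matching Python's in-place assignment
def comprimirLoop (nf : List Int) (i : Nat) : List Int :=
  if i + 1 < nf.length then
    let nf' := if nf.getD i 0 = nf.getD (i + 1) 0
               then (nf.set i (nf.getD i 0 * 2)).set (i + 1) 0
               else nf
    comprimirLoop nf' (i + 1)
  else nf
termination_by nf.length - i
decreasing_by split <;> (try simp only [List.length_set]) <;> omega

def comprimir (fila : List Int) : List Int :=
  let nf := fila.filter (fun n => n ≠ 0)
  let nf2 := (comprimirLoop nf 0).filter (fun n => n ≠ 0)
  nf2 ++ List.replicate (4 - nf2.length) 0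

-- ===== PORT B =====
-- the while-loop over index i of Source B: advance by 2 emitting a merged tile, else by 1
def mergeScan : List Int → List Int
  | [] => []
  | [a] => [a]
  | a :: b :: rest =>
    if a = b then a * 2 :: mergeScan rest else a :: mergeScan (b :: rest)

def comprimir_alt (fila : List Int) : List Int :=
  let vals := fila.filter (fun n => n ≠ 0)
  let result := mergeScan vals
  result ++ List.replicate (4 - result.length) 0

-- ===== PRECONDITION & SPEC =====
def Spec_comprimir (fila : List Int) (out : List Int) : Prop := out = comprimir_alt fila
instance (fila : List Int) (out : List Int) : Decidable (Spec_comprimir fila out) := by unfold Spec_comprimir; infer_instance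

-- ===== CLAIM (what is proved, stated in full; the proofs are below) =====
def Claim_equal_comprimir : Prop := ∀ (fila : List Int), Dom_comprimir fila → Spec_comprimir fila (comprimir fila)

-- ===== LEMMAS AND PROOFS =====

-- shifting the loop past an untouched head element
lemma comprimirLoop_shift (a : Int) :
    ∀ (n : Nat) (tl : List Int) (i : Nat), tl.length - i ≤ n →
      comprimirLoop (a :: tl) (i + 1) = a :: comprimirLoop tl i := by
  intro n
  induction n with
  | zero =>
    intro tl i h
    conv_lhs => rw [comprimirLoop.eq_def]
    conv_rhs => rw [comprimirLoop.eq_def]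
    have h1 : ¬ (i + 1 + 1 < (a :: tl).length) := by simp; omega
    have h2 : ¬ (i + 1 < tl.length) := by omega
    rw [if_neg h1, if_neg h2]
  | succ n ih =>
    intro tl i h
    conv_lhs => rw [comprimirLoop.eq_def]
    conv_rhs => rw [comprimirLoop.eq_def]
    by_cases hlt : i + 1 < tl.length
    · have h1 : i + 1 + 1 < (a :: tl).length := by simp; omega
      rw [if_pos h1, if_pos hlt]
      simp only [List.getD_cons_succ, List.set_cons_succ]
      by_cases heq : tl.getD i 0 = tl.getD (i + 1) 0
      · simp only [if_pos heq]
        exact ih _ (i + 1) (by simp [List.length_set]; omega)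
      · simp only [if_neg heq]
        exact ih tl (i + 1) (by omega)
    · have h1 : ¬ (i + 1 + 1 < (a :: tl).length) := by simp; omega
      rw [if_neg h1, if_neg hlt]

lemma comprimirLoop_shift' (a : Int) (tl : List Int) (i : Nat) :
    comprimirLoop (a :: tl) (i + 1) = a :: comprimirLoop tl i :=
  comprimirLoop_shift a (tl.length) tl i (by omega)

-- pushing the loop past a leading zero (the slot A just zeroed): the comparison
-- 0 = head rest never fires because rest's elements are nonzero
lemma comprimirLoop_zero_cons (rest : List Int) (h : ∀ x ∈ rest, x ≠ 0) :
    comprimirLoop (0 :: rest) 0 = 0 :: comprimirLoop rest 0 := by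
  cases rest with
  | nil =>
    conv_lhs => rw [comprimirLoop.eq_def]
    conv_rhs => rw [comprimirLoop.eq_def]
    simp
  | cons c rest' =>
    conv_lhs => rw [comprimirLoop.eq_def]
    have hc : c ≠ 0 := h c (by simp)
    have h1 : 0 + 1 < (0 :: c :: rest').length := by simp
    rw [if_pos h1]
    have hne : ((0 : Int) :: c :: rest').getD 0 0 ≠ ((0 : Int) :: c :: rest').getD (0 + 1) 0 := by
      simpa using (Ne.symm hc)
    simp only [if_neg hne]
    exact comprimirLoop_shift' 0 (c :: rest') 0

-- main characterisation: on a list of nonzeros, A's loop followed by the re-filter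
-- is exactly B's merge scan
lemma loop_filter_eq_mergeScan :
    ∀ (l : List Int), (∀ x ∈ l, x ≠ 0) →
      (comprimirLoop l 0).filter (fun n => n ≠ 0) = mergeScan l := by
  intro l
  induction l using mergeScan.induct with
  | case1 =>
    intro _
    conv_lhs => rw [comprimirLoop.eq_def]
    simp [mergeScan]
  | case2 a =>
    intro h
    conv_lhs => rw [comprimirLoop.eq_def]
    simp [mergeScan, h a (by simp)]
  | case3 a rest ih =>
    intro h
    have ha : a ≠ 0 := h a (by simp)
    have hrest : ∀ x ∈ rest, x ≠ 0 := fun x hx => h x (by simp [hx])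
    conv_lhs => rw [comprimirLoop.eq_def]
    have h1 : 0 + 1 < (a :: a :: rest).length := by simp
    rw [if_pos h1]
    have hg : ((a : Int) :: a :: rest).getD 0 0 = (a :: a :: rest).getD (0 + 1) 0 := by simp
    simp only [if_pos hg]
    have hset : (((a : Int) :: a :: rest).set 0 (((a : Int) :: a :: rest).getD 0 0 * 2)).set (0 + 1) 0
        = (a * 2) :: (0 : Int) :: rest := by simp
    rw [hset, comprimirLoop_shift' (a * 2) (0 :: rest) 0,
        comprimirLoop_zero_cons rest hrest]
    have h2a : a * 2 ≠ 0 := by intro hc; exact ha (by omega)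
    simp only [mergeScan, if_pos, List.filter_cons]
    simp [h2a]
    simpa using ih hrest
  | case4 a b rest hne ih =>
    intro h
    have ha : a ≠ 0 := h a (by simp)
    have htl : ∀ x ∈ b :: rest, x ≠ 0 := fun x hx => h x (by simp at hx ⊢; tauto)
    conv_lhs => rw [comprimirLoop.eq_def]
    have h1 : 0 + 1 < (a :: b :: rest).length := by simp
    rw [if_pos h1]
    have hg : ((a : Int) :: b :: rest).getD 0 0 ≠ (a :: b :: rest).getD (0 + 1) 0 := by
      simpa using hne
    simp only [if_neg hg]
    rw [comprimirLoop_shift' a (b :: rest) 0]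
    simp only [mergeScan, if_neg hne, List.filter_cons]
    simp [ha]
    simpa using ih htl

-- ===== VERDICT (by name: the statement is the Claim_ definition above) =====
theorem comprimir_spec : Claim_equal_comprimir := by
  intro fila _
  have hnz : ∀ x ∈ fila.filter (fun n => n ≠ 0), x ≠ 0 := by
    intro x hx
    simpa using (List.of_mem_filter hx)
  have hkey := loop_filter_eq_mergeScan _ hnz
  simp only [Spec_comprimir, comprimir, comprimir_alt, hkey]
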